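-- pv_equiv track=rewrite | github.com/William9923/indonesian-aste-generative | reverse-parse.py | get_all_term
-- ===== SOURCE A (Python) =====
-- def get_all_term(tokens, labels):
--     prev = ""
--     term_bio = []
--     for i, token in enumerate(tokens):
--         if i in labels:
--             if prev == "":
--                 term_bio.append("B")
--                 prev = term_bio[-1]
--             else:
--                 term_bio.append("I")
--         else:
--             term_bio.append("O")
--     return term_bio
-- ===== SOURCE B (Python) =====
-- def get_all_term(tokens, labels):
--     first = next((i for i in range(len(tokens)) if i in labels), None)
--     return ["B" if i == first else ("I" if i in labels else "O") for i in range(len(tokens))]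
-- ===== Notes on version B (the rewrite author's own statement) =====
-- stated objective: simpler
-- what changed: Replaces A's single stateful pass carrying a `prev` flag with a find-the-first-labelled-index prepass followed by a stateless comprehension mapping each index to B/I/O.
import Mathlib
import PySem

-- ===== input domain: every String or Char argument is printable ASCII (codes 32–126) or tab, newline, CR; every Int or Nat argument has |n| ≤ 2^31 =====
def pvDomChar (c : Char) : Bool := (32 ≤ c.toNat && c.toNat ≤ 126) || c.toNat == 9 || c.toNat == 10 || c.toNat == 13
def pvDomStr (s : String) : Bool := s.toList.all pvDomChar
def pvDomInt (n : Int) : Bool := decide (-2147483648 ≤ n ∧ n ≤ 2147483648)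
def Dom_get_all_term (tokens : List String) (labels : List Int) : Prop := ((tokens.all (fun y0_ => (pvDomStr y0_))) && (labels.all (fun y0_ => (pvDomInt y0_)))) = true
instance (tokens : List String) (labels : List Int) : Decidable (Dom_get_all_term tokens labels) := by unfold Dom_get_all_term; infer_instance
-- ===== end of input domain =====

-- B is simpler: a prepass finds the first labelled index, then a stateless map builds the tags;
-- A instead carries a `prev` flag through a single pass.

-- ===== PORT A =====
-- loop over `enumerate(tokens)` carrying `prev` and appending to `term_bio`
def getAllTermGo (labels : List Int) : Nat → String → List String → List String
  | _, _, [] => []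
  | i, prev, _ :: ts =>
    if labels.contains (i : Int) then
      if prev == "" then
        "B" :: getAllTermGo labels (i + 1) "B" ts      -- prev = term_bio[-1] = "B"
      else
        "I" :: getAllTermGo labels (i + 1) prev ts
    else
      "O" :: getAllTermGo labels (i + 1) prev ts

def get_all_term (tokens : List String) (labels : List Int) : List String :=
  getAllTermGo labels 0 "" tokens

-- ===== PORT B =====
-- `next((i for i in range(len(tokens)) if i in labels), None)` then a comprehension over range(len(tokens))
def get_all_term_alt (tokens : List String) (labels : List Int) : List String :=
  let first := (List.range tokens.length).find? (fun (i : Nat) => labels.contains (i : Int))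
  (List.range tokens.length).map (fun (i : Nat) =>
    if first = some i then "B"
    else if labels.contains (i : Int) then "I" else "O")

-- ===== PRECONDITION & SPEC =====
def Spec_get_all_term (tokens : List String) (labels : List Int) (out : List String) : Prop := out = get_all_term_alt tokens labels
instance (tokens : List String) (labels : List Int) (out : List String) : Decidable (Spec_get_all_term tokens labels out) := by unfold Spec_get_all_term; infer_instance

-- ===== CLAIM (what is proved, stated in full; the proofs are below) =====
def Claim_equal_get_all_term : Prop := ∀ (tokens : List String) (labels : List Int), Dom_get_all_term tokens labels → Spec_get_all_term tokens labels (get_all_term tokens labels)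

-- ===== LEMMAS AND PROOFS =====

-- once `prev = "B"`, A emits "I"/"O" according to membership alone
theorem getAllTermGo_done (labels : List Int) (ts : List String) :
    ∀ i : Nat, getAllTermGo labels i "B" ts =
      (List.range' i ts.length).map (fun (j : Nat) =>
        if labels.contains (j : Int) then "I" else "O") := by
  induction ts with
  | nil => intro i; rfl
  | cons t ts ih =>
    intro i
    simp only [getAllTermGo, List.length_cons, List.range'_succ, List.map_cons, ih]
    by_cases h : (i : Int) ∈ labels <;> simp [h]

-- while `prev = ""`, A's output over the remaining indices is B's map with the
-- first labelled index taken within the remaining range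
theorem getAllTermGo_seek (labels : List Int) (ts : List String) :
    ∀ i : Nat, getAllTermGo labels i "" ts =
      (List.range' i ts.length).map (fun (j : Nat) =>
        if (List.range' i ts.length).find? (fun (k : Nat) => labels.contains (k : Int)) = some j then "B"
        else if labels.contains (j : Int) then "I" else "O") := by
  induction ts with
  | nil => intro i; rfl
  | cons t ts ih =>
    intro i
    by_cases h : (i : Int) ∈ labels
    · -- the first labelled index is i: emit "B", switch to the done phase
      simp only [getAllTermGo, List.length_cons, List.range'_succ, List.map_cons]
      simp only [List.find?_cons_of_pos (p := fun (k : Nat) => labels.contains (k : Int)) (by simpa using h), getAllTermGo_done]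
      simp only [List.contains_iff_mem, h, BEq.rfl, if_pos, List.cons.injEq]
      refine ⟨trivial, ?_⟩
      apply List.map_congr_left
      intro j hj
      have hji : i < j := (List.mem_range'_1.mp hj).1
      have hne : ¬ (some i = some j) := by
        intro hc
        exact absurd (Option.some_inj.mp hc) (by omega)
      simp [hne]
    · -- index i is unlabelled: emit "O", keep seeking
      simp only [getAllTermGo, List.length_cons, List.range'_succ, List.map_cons]
      simp only [List.find?_cons_of_neg (p := fun (k : Nat) => labels.contains (k : Int)) (by simpa using h), ih]
      simp only [List.contains_iff_mem, h, if_false, List.cons.injEq]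
      refine ⟨?_, trivial⟩
      simp

-- ===== VERDICT (by name: the statement is the Claim_ definition above) =====
theorem get_all_term_spec : Claim_equal_get_all_term := by
  intro tokens labels _
  unfold Spec_get_all_term get_all_term get_all_term_alt
  rw [getAllTermGo_seek]
  simp [List.range_eq_range']
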